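-- pv_equiv track=rewrite | github.com/sigma-py/orthopy | test/test_e1r2.py | _integrate_all_monomials_probabilists
-- ===== SOURCE A (Python) =====
-- def _integrate_all_monomials_probabilists(max_k):
--     out = []
--     for k in range(max_k + 1):
--         if k == 0:
--             out.append(1)
--         elif k == 1:
--             out.append(0)
--         else:
--             out.append(out[k - 2] * (k - 1))
--     return out
-- ===== SOURCE B (Python) =====
-- def _integrate_all_monomials_probabilists(max_k):
--     # closed form: the k-th probabilists' Hermite moment is 0 for odd k
--     # and the double factorial (k-1)!! = 1*3*...*(k-1) for even k
--     out = []
--     for k in range(max_k + 1):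
--         if k % 2 == 1:
--             out.append(0)
--         else:
--             p = 1
--             for j in range(1, k, 2):
--                 p *= j
--             out.append(p)
--     return out
-- ===== Notes on version B (the rewrite author's own statement) =====
-- stated objective: alternative
-- what changed: A's recurrence that reads the previously stored output two places back is replaced by an independent closed-form value per index: zero for odd indices and the double factorial of the predecessor, computed as a fresh product over the smaller odd numbers, for even indices.
import Mathlib
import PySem

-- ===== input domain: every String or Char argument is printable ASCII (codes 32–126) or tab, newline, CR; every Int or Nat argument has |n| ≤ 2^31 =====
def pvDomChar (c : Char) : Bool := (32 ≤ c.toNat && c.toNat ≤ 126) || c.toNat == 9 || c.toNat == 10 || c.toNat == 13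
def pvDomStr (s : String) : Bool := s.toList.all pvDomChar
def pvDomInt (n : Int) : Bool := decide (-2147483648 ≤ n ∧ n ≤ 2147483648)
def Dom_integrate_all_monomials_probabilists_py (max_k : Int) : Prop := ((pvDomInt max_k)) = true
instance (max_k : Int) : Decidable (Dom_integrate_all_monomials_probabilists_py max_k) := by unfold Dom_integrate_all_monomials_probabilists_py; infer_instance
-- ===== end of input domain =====

-- B replaces A's recurrence out[k] = out[k-2]*(k-1) by an independent closed-form
-- double-factorial product per k (alternative decomposition, not claimed faster).


-- ===== PORT A =====
-- literal transliteration of A: append 1, 0, or out[k-2]*(k-1) depending on k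
def integrate_all_monomials_probabilists_py (max_k : Int) : List Int :=
  (PySem.List.pyRange 0 (max_k + 1) 1).foldl
    (fun out k =>
      if k = 0 then out ++ [1]
      else if k = 1 then out ++ [0]
      else out ++ [PySem.List.pyGetD out (k - 2) 0 * (k - 1)])
    []

-- ===== PORT B =====
-- p = 1; for j in range(1, k, 2): p *= j
def pvOddProd (k : Int) : Int :=
  (PySem.List.pyRange 1 k 2).foldl (fun p j => p * j) 1

def integrate_all_monomials_probabilists_py_alt (max_k : Int) : List Int :=
  (PySem.List.pyRange 0 (max_k + 1) 1).foldl
    (fun out k =>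
      if PySem.Int.mod k 2 = 1 then out ++ [0]
      else out ++ [pvOddProd k])
    []

-- ===== PRECONDITION & SPEC =====
def Spec_integrate_all_monomials_probabilists_py (max_k : Int) (out : List Int) : Prop := out = integrate_all_monomials_probabilists_py_alt max_k
instance (max_k : Int) (out : List Int) : Decidable (Spec_integrate_all_monomials_probabilists_py max_k out) := by unfold Spec_integrate_all_monomials_probabilists_py; infer_instance

-- ===== CLAIM (what is proved, stated in full; the proofs are below) =====
def Claim_equal_integrate_all_monomials_probabilists_py : Prop := ∀ (max_k : Int), Dom_integrate_all_monomials_probabilists_py max_k → Spec_integrate_all_monomials_probabilists_py max_k (integrate_all_monomials_probabilists_py max_k)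

-- ===== LEMMAS AND PROOFS =====

-- the intended moment sequence, as A's recurrence
def pvHm : Nat → Int
  | 0 => 1
  | 1 => 0
  | (n + 2) => pvHm n * (n + 1)

-- B's per-element value
def pvFB (k : Int) : Int :=
  if PySem.Int.mod k 2 = 1 then 0 else pvOddProd k

lemma pvMod2 (n : Nat) : PySem.Int.mod (n : Int) 2 = ((n % 2 : Nat) : Int) := by
  rw [PySem.Int.mod_eq_emod_of_pos (by norm_num)]
  omega

lemma pvOddProd_even (m : Nat) :
    pvOddProd ((2 * m : Nat) : Int) =
      ((List.range m).map (fun k : Nat => 1 + 2 * (k : Int))).foldl (fun p j => p * j) 1 := by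
  unfold pvOddProd
  rw [PySem.List.pyRange_of_pos 1 ((2 * m : Nat) : Int) (by norm_num)]
  have hcount : (if (1 : Int) < ((2 * m : Nat) : Int)
      then ((((2 * m : Nat) : Int) - 1 + 2 - 1) / 2).toNat else 0) = m := by
    split_ifs with h <;> omega
  rw [hcount]

lemma pvOddProd_step (m : Nat) :
    pvOddProd ((2 * (m + 1) : Nat) : Int) = pvOddProd ((2 * m : Nat) : Int) * (2 * (m : Int) + 1) := by
  rw [pvOddProd_even, pvOddProd_even, List.range_succ, List.map_append, List.foldl_append]
  simp only [List.map_cons, List.map_nil, List.foldl_cons, List.foldl_nil]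
  ring

lemma pvFB_eq_hm : ∀ n : Nat, pvFB (n : Int) = pvHm n := by
  intro n
  induction n using Nat.strong_induction_on with
  | _ n ih =>
    match n with
    | 0 => decide
    | 1 => decide
    | (m + 2) =>
      have ihm := ih m (by omega)
      unfold pvFB at ihm ⊢
      rw [pvMod2] at ihm ⊢
      rcases Nat.even_or_odd m with ⟨j, hj⟩ | ⟨j, hj⟩
      · -- even m: both branches are the double-factorial product
        have hm2 : m = 2 * j := by omega
        have e1 : (m + 2) % 2 = 0 := by omega
        have e2 : m % 2 = 0 := by omega
        rw [e1]
        rw [e2] at ihm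
        rw [if_neg (by norm_num)] at ihm
        rw [if_neg (by norm_num)]
        rw [show ((m + 2 : Nat) : Int) = ((2 * (j + 1) : Nat) : Int) from by push_cast; omega]
        rw [pvOddProd_step]
        rw [show ((2 * j : Nat) : Int) = ((m : Nat) : Int) from by push_cast; omega]
        rw [ihm]
        rw [show pvHm (m + 2) = pvHm m * ((m : Int) + 1) from rfl]
        rw [show (2 * (j : Int) + 1) = ((m : Int) + 1) from by push_cast [hm2]; ring]
      · -- odd m: both are 0
        have e1 : (m + 2) % 2 = 1 := by omega
        have e2 : m % 2 = 1 := by omega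
        rw [e2] at ihm
        rw [if_pos (by norm_num)] at ihm
        rw [e1, if_pos (by norm_num)]
        rw [show pvHm (m + 2) = pvHm m * ((m : Int) + 1) from rfl, ← ihm]
        ring

-- A's fold over the casted range builds the map of pvHm
lemma pvA_fold (n : Nat) :
    ((List.range n).map (fun k : Nat => (k : Int))).foldl
      (fun out k =>
        if k = 0 then out ++ [1]
        else if k = 1 then out ++ [0]
        else out ++ [PySem.List.pyGetD out (k - 2) 0 * (k - 1)])
      [] = (List.range n).map pvHm := by
  induction n with
  | zero => simp
  | succ m ih =>
    rw [List.range_succ, List.map_append, List.foldl_append, ih, List.map_append]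
    simp only [List.map_cons, List.map_nil, List.foldl_cons, List.foldl_nil]
    match m with
    | 0 => decide
    | 1 => decide
    | (j + 2) =>
      have h0 : ¬ ((j + 2 : Nat) : Int) = 0 := by omega
      have h1 : ¬ ((j + 2 : Nat) : Int) = 1 := by omega
      rw [if_neg h0, if_neg h1]
      have hc : ((j + 2 : Nat) : Int) - 2 = ((j : Nat) : Int) := by push_cast; ring
      rw [hc, PySem.List.pyGetD_natCast, PySem.List.getD_map_range pvHm (j + 2) j 0 (by omega)]
      have h2 : ((j + 2 : Nat) : Int) - 1 = ((j : Nat) : Int) + 1 := by push_cast; ring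
      rw [h2]
      rfl

theorem pv_main (max_k : Int) :
    integrate_all_monomials_probabilists_py max_k = integrate_all_monomials_probabilists_py_alt max_k := by
  unfold integrate_all_monomials_probabilists_py integrate_all_monomials_probabilists_py_alt
  rw [PySem.List.pyRange_zero (max_k + 1)]
  rw [pvA_fold]
  rw [show (fun (out : List Int) (k : Int) =>
        if PySem.Int.mod k 2 = 1 then out ++ [0] else out ++ [pvOddProd k])
      = (fun out k => out ++ [pvFB k]) from by
    funext out k; unfold pvFB; split_ifs <;> rfl]
  rw [PySem.List.foldl_append_singleton_eq_map pvFB _ []]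
  rw [List.map_map, List.nil_append]
  exact (List.map_congr_left (fun k _ => (pvFB_eq_hm k).symm))

-- ===== VERDICT (by name: the statement is the Claim_ definition above) =====
theorem integrate_all_monomials_probabilists_py_spec : Claim_equal_integrate_all_monomials_probabilists_py := by
  intro max_k _
  unfold Spec_integrate_all_monomials_probabilists_py
  exact pv_main max_k
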